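-- pv_equiv track=rewrite | github.com/Skezza/pm99-research | scripts/profile_roster_promotion_unsafe_families.py | _extract_unsafe_subfamily
-- ===== SOURCE A (Python) =====
-- def _canonical_detail_token(token: str) -> str:
--     normalized = str(token or "").strip()
--     if not normalized:
--         return ""
--     return normalized.split("(", 1)[0].strip()
--
-- def _extract_unsafe_subfamily(reason_message: str) -> tuple[str, str, str, str]:
--     """Return (subfamily, primary_token, parser_token, detail)."""
--     message = str(reason_message or "").strip()
--     detail = ""
--     if "[" in message and message.endswith("]"):
--         detail = message.split("[", 1)[1][:-1].strip()
--
--     parts = [part.strip() for part in detail.split(";") if part.strip()]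
--     primary = _canonical_detail_token(parts[0]) if parts else "no_detail"
--
--     parser_token = ""
--     for part in parts:
--         if part.startswith("parser_candidate:"):
--             parser_token = _canonical_detail_token(part)
--             break
--
--     spill_token = ""
--     for part in parts:
--         if part.startswith("parser_candidate:text_spill_"):
--             spill_token = _canonical_detail_token(part)
--             break
--
--     if spill_token:
--         return spill_token, primary, parser_token, detail
--     if parser_token:
--         return parser_token, primary, parser_token, detail
--     return primary, primary, parser_token, detail
-- ===== SOURCE B (Python) =====
-- def _canonical_detail_token(token: str) -> str:
--     normalized = str(token or "").strip()
--     if not normalized: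
--         return ""
--     return normalized.split("(", 1)[0].strip()
--
-- def _extract_unsafe_subfamily(reason_message: str) -> tuple[str, str, str, str]:
--     """Return (subfamily, primary_token, parser_token, detail)."""
--     message = str(reason_message or "").strip()
--     detail = ""
--     if "[" in message and message.endswith("]"):
--         detail = message.split("[", 1)[1][:-1].strip()
--
--     parts = [part.strip() for part in detail.split(";") if part.strip()]
--     primary = _canonical_detail_token(parts[0]) if parts else "no_detail"
--
--     # One linear pass: remember the first parser_candidate part and the first
--     # text_spill part.  A text_spill part is itself a parser_candidate part,
--     # so once a spill is seen both slots are filled and the scan can stop.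
--     parser_part = None
--     spill_part = None
--     for part in parts:
--         if parser_part is None and part.startswith("parser_candidate:"):
--             parser_part = part
--         if part.startswith("parser_candidate:text_spill_"):
--             spill_part = part
--             break
--
--     parser_token = _canonical_detail_token(parser_part) if parser_part is not None else ""
--     spill_token = _canonical_detail_token(spill_part) if spill_part is not None else ""
--     subfamily = spill_token or parser_token or primary
--     return subfamily, primary, parser_token, detail
-- ===== Notes on version B (the rewrite author's own statement) =====
-- stated objective: simpler
-- what changed: A's two separate for-loops over parts (one for the first parser_candidate part, one for the first text_spill part) are merged into a single linear pass with two accumulators that stops at the first text_spill part; the final precedence (spill, else parser, else primary) is unchanged.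
import Mathlib
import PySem

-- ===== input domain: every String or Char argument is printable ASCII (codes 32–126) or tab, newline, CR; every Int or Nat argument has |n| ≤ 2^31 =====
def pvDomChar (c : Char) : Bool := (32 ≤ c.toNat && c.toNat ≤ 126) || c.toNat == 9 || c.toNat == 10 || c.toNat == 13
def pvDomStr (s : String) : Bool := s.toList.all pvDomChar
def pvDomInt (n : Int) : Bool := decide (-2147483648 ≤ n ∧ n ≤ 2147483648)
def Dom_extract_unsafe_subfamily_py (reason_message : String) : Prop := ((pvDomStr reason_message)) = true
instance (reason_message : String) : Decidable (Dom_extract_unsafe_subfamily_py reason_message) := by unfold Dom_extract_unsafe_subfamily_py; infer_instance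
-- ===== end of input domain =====

-- B merges A's two scans over `parts` into one linear pass with two accumulators (objective: simpler/alternative decomposition, same cost).

-- ===== PORT A =====
-- _canonical_detail_token (shared helper of both Pythons)
def pvCanon (token : String) : String :=
  let normalized := PySem.Str.strip token
  if normalized == "" then ""
  else PySem.Str.strip ((((PySem.Str.splitMax? normalized "(" 1).getD []).headD ""))

-- A's code after `parts`/`primary`/`detail` are built: two for-loops with break
-- (first match = List.find?), then the precedence chain of ifs.
def pvTailA (parts : List String) (primary detail : String) : String × String × String × String :=
  let parser_token :=
    match parts.find? (fun part => PySem.Str.startswith part "parser_candidate:") with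
    | some part => pvCanon part
    | none => ""
  let spill_token :=
    match parts.find? (fun part => PySem.Str.startswith part "parser_candidate:text_spill_") with
    | some part => pvCanon part
    | none => ""
  if spill_token ≠ "" then (spill_token, primary, parser_token, detail)
  else if parser_token ≠ "" then (parser_token, primary, parser_token, detail)
  else (primary, primary, parser_token, detail)

def extract_unsafe_subfamily_py (reason_message : String) : String × String × String × String :=
  let message := PySem.Str.strip reason_message
  let detail :=
    if PySem.Str.isIn "[" message && PySem.Str.endswith message "]" then
      PySem.Str.strip (PySem.Str.slice (((PySem.Str.splitMax? message "[" 1).getD []).getD 1 "") none (some (-1)))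
    else ""
  let parts := (((PySem.Str.split? detail ";").getD []).map PySem.Str.strip).filter (fun part => !(part == ""))
  let primary := match parts with | [] => "no_detail" | part :: _ => pvCanon part
  pvTailA parts primary detail

-- ===== PORT B =====
-- B's single pass: first parser_candidate part and first text_spill part,
-- stopping at the first spill (which is itself a parser_candidate part).
def pvScan : List String → Option String → Option String × Option String
  | [], parser_part => (parser_part, none)
  | part :: rest, parser_part =>
      let parser_part :=
        if parser_part.isNone && PySem.Str.startswith part "parser_candidate:" then some part
        else parser_part
      if PySem.Str.startswith part "parser_candidate:text_spill_" then (parser_part, some part)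
      else pvScan rest parser_part

-- Python's `a or b` on strings (truthiness = nonempty)
def pvOrStr (a b : String) : String := if a == "" then b else a

def pvTailB (parts : List String) (primary detail : String) : String × String × String × String :=
  let scanned := pvScan parts none
  let parser_token := (scanned.1.map pvCanon).getD ""
  let spill_token := (scanned.2.map pvCanon).getD ""
  let subfamily := pvOrStr spill_token (pvOrStr parser_token primary)
  (subfamily, primary, parser_token, detail)

def extract_unsafe_subfamily_py_alt (reason_message : String) : String × String × String × String :=
  let message := PySem.Str.strip reason_message
  let detail :=
    if PySem.Str.isIn "[" message && PySem.Str.endswith message "]" then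
      PySem.Str.strip (PySem.Str.slice (((PySem.Str.splitMax? message "[" 1).getD []).getD 1 "") none (some (-1)))
    else ""
  let parts := (((PySem.Str.split? detail ";").getD []).map PySem.Str.strip).filter (fun part => !(part == ""))
  let primary := match parts with | [] => "no_detail" | part :: _ => pvCanon part
  pvTailB parts primary detail

-- ===== PRECONDITION & SPEC =====
def Spec_extract_unsafe_subfamily_py (reason_message : String) (out : String × String × String × String) : Prop := out = extract_unsafe_subfamily_py_alt reason_message
instance (reason_message : String) (out : String × String × String × String) : Decidable (Spec_extract_unsafe_subfamily_py reason_message out) := by unfold Spec_extract_unsafe_subfamily_py; infer_instance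

-- ===== CLAIM (what is proved, stated in full; the proofs are below) =====
def Claim_equal_extract_unsafe_subfamily_py : Prop := ∀ (reason_message : String), Dom_extract_unsafe_subfamily_py reason_message → Spec_extract_unsafe_subfamily_py reason_message (extract_unsafe_subfamily_py reason_message)

-- ===== LEMMAS AND PROOFS =====

-- a text_spill part is a parser_candidate part
theorem spill_imp_parser (p : String) (h : PySem.Str.startswith p "parser_candidate:text_spill_" = true) :
    PySem.Str.startswith p "parser_candidate:" = true := by
  rw [PySem.Str.startswith_eq] at h ⊢
  rw [PySem.Chars.startswith_iff] at h ⊢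
  exact List.IsPrefix.trans (by decide) h

-- once the parser slot is filled the scan only looks for the first spill part
theorem pvScan_some (l : List String) (p0 : String) :
    pvScan l (some p0) = (some p0, l.find? (fun part => PySem.Str.startswith part "parser_candidate:text_spill_")) := by
  induction l with
  | nil => simp [pvScan]
  | cons p rest ih =>
      by_cases h : PySem.Str.startswith p "parser_candidate:text_spill_" = true <;>
        simp at h <;> simp [pvScan, List.find?, h, ih]

-- the single pass from the empty state computes both first matches
theorem pvScan_none (l : List String) :
    pvScan l none = (l.find? (fun part => PySem.Str.startswith part "parser_candidate:"),
                     l.find? (fun part => PySem.Str.startswith part "parser_candidate:text_spill_")) := by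
  induction l with
  | nil => simp [pvScan]
  | cons p rest ih =>
      by_cases hP : PySem.Str.startswith p "parser_candidate:" = true
      · by_cases hS : PySem.Str.startswith p "parser_candidate:text_spill_" = true
        · simp at hP hS; simp [pvScan, List.find?, hP, hS]
        · simp at hP hS; simp [pvScan, List.find?, hP, hS, pvScan_some]
      · have hS : PySem.Str.startswith p "parser_candidate:text_spill_" = false := by
          cases hS' : PySem.Str.startswith p "parser_candidate:text_spill_" with
          | false => rfl
          | true => exact absurd (spill_imp_parser p hS') hP
        simp at hP hS
        simp [pvScan, List.find?, hP, hS, ih]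

theorem tail_eq (parts : List String) (primary detail : String) :
    pvTailA parts primary detail = pvTailB parts primary detail := by
  unfold pvTailA pvTailB pvOrStr
  rw [pvScan_none]
  cases hP : parts.find? (fun part => PySem.Str.startswith part "parser_candidate:") <;>
  cases hS : parts.find? (fun part => PySem.Str.startswith part "parser_candidate:text_spill_") <;>
    simp only [Option.map_some, Option.map_none, Option.getD_some, Option.getD_none] <;>
    split_ifs <;> simp_all

-- ===== VERDICT (by name: the statement is the Claim_ definition above) =====
theorem extract_unsafe_subfamily_py_spec : Claim_equal_extract_unsafe_subfamily_py := by
  intro s _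
  unfold Spec_extract_unsafe_subfamily_py extract_unsafe_subfamily_py extract_unsafe_subfamily_py_alt
  exact tail_eq _ _ _
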